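-- pv_equiv track=rewrite | github.com/VishalTheHuman/Dark-Stores-Environment | server/gradio_ui.py | get_manhattan_path
-- ===== SOURCE A (Python) =====
-- def get_manhattan_path(start, end):
--     path = []
--     r, c = start
--     tr, tc = end
--     while r != tr or c != tc:
--         if r < tr: r += 1
--         elif r > tr: r -= 1
--         elif c < tc: c += 1
--         elif c > tc: c -= 1
--         path.append((r, c))
--     return path
-- ===== SOURCE B (Python) =====
-- def get_manhattan_path(start, end):
--     r, c = start
--     tr, tc = end
--     dr, dc = tr - r, tc - c
--     n, m = abs(dr), abs(dc)
--     sr = (dr > 0) - (dr < 0)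
--     sc = (dc > 0) - (dc < 0)
--
--     def cell(k):
--         if k <= n:
--             return (r + sr * k, c)
--         return (tr, c + sc * (k - n))
--
--     return [cell(k) for k in range(1, n + m + 1)]
-- ===== Notes on version B (the rewrite author's own statement) =====
-- stated objective: alternative
-- what changed: Replaces A's stateful step-by-step while loop by a closed-form indexing scheme: the k-th path cell is computed directly by arithmetic on the step index k (row phase for k<=|dr|, column phase after), via a single comprehension over range(1, |dr|+|dc|+1).
import Mathlib
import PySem

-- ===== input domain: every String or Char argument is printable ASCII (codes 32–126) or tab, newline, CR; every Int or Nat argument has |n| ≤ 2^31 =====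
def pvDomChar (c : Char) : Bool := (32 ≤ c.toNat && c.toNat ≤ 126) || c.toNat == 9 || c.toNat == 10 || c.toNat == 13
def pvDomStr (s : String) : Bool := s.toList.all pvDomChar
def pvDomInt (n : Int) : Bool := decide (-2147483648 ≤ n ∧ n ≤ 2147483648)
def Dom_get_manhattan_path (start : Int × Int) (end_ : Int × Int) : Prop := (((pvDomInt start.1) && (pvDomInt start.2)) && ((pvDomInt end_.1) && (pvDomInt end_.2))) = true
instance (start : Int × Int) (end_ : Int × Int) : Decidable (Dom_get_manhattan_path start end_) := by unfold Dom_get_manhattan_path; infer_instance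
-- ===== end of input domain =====

-- B replaces A's stateful step-by-step walk by a closed-form rule computing the k-th cell
-- directly from the step index k; objective: alternative (same cost, different algorithm).

-- ===== PORT A =====
-- literal port of A's while loop: one cell appended per iteration, if/elif chain in source order
def pvLoopA (r c tr tc : Int) : List (Int × Int) :=
  if r ≠ tr ∨ c ≠ tc then
    if r < tr then (r + 1, c) :: pvLoopA (r + 1) c tr tc
    else if r > tr then (r - 1, c) :: pvLoopA (r - 1) c tr tc
    else if c < tc then (r, c + 1) :: pvLoopA r (c + 1) tr tc
    else (r, c - 1) :: pvLoopA r (c - 1) tr tc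
  else []
termination_by (tr - r).natAbs + (tc - c).natAbs
decreasing_by all_goals omega

def get_manhattan_path (start : Int × Int) (end_ : Int × Int) : List (Int × Int) :=
  pvLoopA start.1 start.2 end_.1 end_.2

-- ===== PORT B =====
-- port of Source B: sign via (dr > 0) - (dr < 0) as 0/1 subtraction, cell(k) by index arithmetic
def get_manhattan_path_alt (start : Int × Int) (end_ : Int × Int) : List (Int × Int) :=
  let r := start.1
  let c := start.2
  let tr := end_.1
  let tc := end_.2
  let dr := tr - r
  let dc := tc - c
  let n : Int := |dr|
  let m : Int := |dc|
  let sr : Int := (if dr > 0 then 1 else 0) - (if dr < 0 then 1 else 0)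
  let sc : Int := (if dc > 0 then 1 else 0) - (if dc < 0 then 1 else 0)
  (PySem.List.pyRange 1 (n + m + 1) 1).map (fun k =>
    if k ≤ n then (r + sr * k, c) else (tr, c + sc * (k - n)))

-- ===== PRECONDITION & SPEC =====
def Spec_get_manhattan_path (start : Int × Int) (end_ : Int × Int) (out : List (Int × Int)) : Prop := out = get_manhattan_path_alt start end_
instance (start : Int × Int) (end_ : Int × Int) (out : List (Int × Int)) : Decidable (Spec_get_manhattan_path start end_ out) := by unfold Spec_get_manhattan_path; infer_instance

-- ===== CLAIM =====
def Claim_equal_get_manhattan_path : Prop := ∀ (start : Int × Int) (end_ : Int × Int), Dom_get_manhattan_path start end_ → Spec_get_manhattan_path start end_ (get_manhattan_path start end_)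

-- ===== LEMMAS AND PROOFS =====

-- horizontal phase of A, increasing column
lemma pvH_up (tr tc : Int) : ∀ (k : Nat) (c : Int), c + k = tc →
    pvLoopA tr c tr tc = (List.range (tc - c).toNat).map (fun (j : Nat) => (tr, c + (1 + (j : Int)))) := by
  intro k
  induction k with
  | zero =>
    intro c h
    have hc : c = tc := by omega
    rw [pvLoopA, if_neg (by omega), show (tc - c).toNat = 0 by omega]
    simp
  | succ i ih =>
    intro c h
    have hlt : c < tc := by omega
    rw [pvLoopA]
    simp only [if_pos (Or.inr (by omega : c ≠ tc)), if_neg (lt_irrefl tr), gt_iff_lt, if_pos hlt]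
    rw [ih (c + 1) (by omega), show (tc - c).toNat = (tc - (c+1)).toNat + 1 by omega,
      List.range_succ_eq_map]
    simp only [List.map_cons, List.map_map]
    rw [List.cons_eq_cons]
    refine ⟨by rw [Prod.mk.injEq]; exact ⟨rfl, by norm_num⟩, ?_⟩
    exact List.map_congr_left (fun j _ => by
      simp only [Function.comp, Prod.mk.injEq]
      exact ⟨trivial, by push_cast; ring⟩)

-- horizontal phase of A, decreasing column
lemma pvH_down (tr tc : Int) : ∀ (k : Nat) (c : Int), c - k = tc →
    pvLoopA tr c tr tc = (List.range (c - tc).toNat).map (fun (j : Nat) => (tr, c - (1 + (j : Int)))) := by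
  intro k
  induction k with
  | zero =>
    intro c h
    have hc : c = tc := by omega
    rw [pvLoopA, if_neg (by omega), show (c - tc).toNat = 0 by omega]
    simp
  | succ i ih =>
    intro c h
    have hgt : tc < c := by omega
    rw [pvLoopA]
    simp only [if_pos (Or.inr (by omega : c ≠ tc)), if_neg (lt_irrefl tr), gt_iff_lt,
      if_neg (by omega : ¬ c < tc)]
    rw [ih (c - 1) (by omega), show (c - tc).toNat = ((c-1) - tc).toNat + 1 by omega,
      List.range_succ_eq_map]
    simp only [List.map_cons, List.map_map]
    rw [List.cons_eq_cons]
    refine ⟨by rw [Prod.mk.injEq]; exact ⟨rfl, by norm_num⟩, ?_⟩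
    exact List.map_congr_left (fun j _ => by
      simp only [Function.comp, Prod.mk.injEq]
      exact ⟨trivial, by push_cast; ring⟩)

-- vertical phase of A, increasing row, leaving the horizontal phase as a tail
lemma pvV_up (c tr tc : Int) : ∀ (k : Nat) (r : Int), r + k = tr →
    pvLoopA r c tr tc =
      (List.range (tr - r).toNat).map (fun (j : Nat) => (r + (1 + (j : Int)), c)) ++ pvLoopA tr c tr tc := by
  intro k
  induction k with
  | zero =>
    intro r h
    have hr : r = tr := by omega
    subst hr
    simp
  | succ i ih =>
    intro r h
    have hlt : r < tr := by omega
    rw [pvLoopA]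
    simp only [if_pos (Or.inl (by omega : r ≠ tr)), if_pos hlt]
    rw [ih (r + 1) (by omega), show (tr - r).toNat = (tr - (r+1)).toNat + 1 by omega,
      List.range_succ_eq_map]
    simp only [List.map_cons, List.map_map, List.cons_append]
    rw [List.cons_eq_cons]
    refine ⟨by rw [Prod.mk.injEq]; exact ⟨by norm_num, rfl⟩, ?_⟩
    rw [List.append_cancel_right_eq]
    exact List.map_congr_left (fun j _ => by
      simp only [Function.comp, Prod.mk.injEq]
      exact ⟨by push_cast; ring, trivial⟩)

-- vertical phase of A, decreasing row
lemma pvV_down (c tr tc : Int) : ∀ (k : Nat) (r : Int), r - k = tr →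
    pvLoopA r c tr tc =
      (List.range (r - tr).toNat).map (fun (j : Nat) => (r - (1 + (j : Int)), c)) ++ pvLoopA tr c tr tc := by
  intro k
  induction k with
  | zero =>
    intro r h
    have hr : r = tr := by omega
    subst hr
    simp
  | succ i ih =>
    intro r h
    have hgt : tr < r := by omega
    rw [pvLoopA]
    simp only [if_pos (Or.inl (by omega : r ≠ tr)), if_neg (by omega : ¬ r < tr),
      gt_iff_lt, if_pos hgt]
    rw [ih (r - 1) (by omega), show (r - tr).toNat = ((r-1) - tr).toNat + 1 by omega,
      List.range_succ_eq_map]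
    simp only [List.map_cons, List.map_map, List.cons_append]
    rw [List.cons_eq_cons]
    refine ⟨by rw [Prod.mk.injEq]; exact ⟨by norm_num, rfl⟩, ?_⟩
    rw [List.append_cancel_right_eq]
    exact List.map_congr_left (fun j _ => by
      simp only [Function.comp, Prod.mk.injEq]
      exact ⟨by push_cast; ring, trivial⟩)

-- A's loop in a common normal form: row segment then column segment, as maps over List.range
lemma pvLoopA_norm (r c tr tc : Int) :
    pvLoopA r c tr tc =
      (List.range (tr - r).natAbs).map
        (fun (j : Nat) => (r + (if r < tr then (1:Int) + (j : Int) else -(1 + (j : Int))), c)) ++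
      (List.range (tc - c).natAbs).map
        (fun (j : Nat) => (tr, c + (if c < tc then (1:Int) + (j : Int) else -(1 + (j : Int))))) := by
  have htail : pvLoopA tr c tr tc =
      (List.range (tc - c).natAbs).map
        (fun (j : Nat) => (tr, c + (if c < tc then (1:Int) + (j : Int) else -(1 + (j : Int))))) := by
    by_cases hc : c < tc
    · rw [pvH_up tr tc (tc - c).toNat c (by omega)]
      rw [show (tc - c).toNat = (tc - c).natAbs by omega]
      exact List.map_congr_left (fun j _ => by rw [if_pos hc])
    · rw [pvH_down tr tc (c - tc).toNat c (by omega)]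
      rw [show (c - tc).toNat = (tc - c).natAbs by omega]
      exact List.map_congr_left (fun j _ => by
        rw [if_neg hc, Prod.mk.injEq]; exact ⟨rfl, by omega⟩)
  by_cases hr : r < tr
  · rw [pvV_up c tr tc (tr - r).toNat r (by omega), htail,
      show (tr - r).toNat = (tr - r).natAbs by omega]
    rw [List.append_cancel_right_eq]
    exact List.map_congr_left (fun j _ => by rw [if_pos hr])
  · rw [pvV_down c tr tc (r - tr).toNat r (by omega), htail,
      show (r - tr).toNat = (tr - r).natAbs by omega]
    rw [List.append_cancel_right_eq]
    exact List.map_congr_left (fun j _ => by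
      rw [if_neg hr, Prod.mk.injEq]; exact ⟨by omega, rfl⟩)

-- B's comprehension in the same normal form
lemma pvAlt_norm (r c tr tc : Int) :
    get_manhattan_path_alt (r, c) (tr, tc) =
      (List.range (tr - r).natAbs).map
        (fun (j : Nat) => (r + (if r < tr then (1:Int) + (j : Int) else -(1 + (j : Int))), c)) ++
      (List.range (tc - c).natAbs).map
        (fun (j : Nat) => (tr, c + (if c < tc then (1:Int) + (j : Int) else -(1 + (j : Int))))) := by
  unfold get_manhattan_path_alt
  simp only [Int.abs_eq_natAbs]
  rw [PySem.List.pyRange_one_append 1 (((tr - r).natAbs : Int) + 1)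
      (((tr - r).natAbs : Int) + ((tc - c).natAbs : Int) + 1) (by omega) (by omega),
    List.map_append]
  congr 1
  · rw [PySem.List.pyRange_one, List.map_map,
      show ((((tr - r).natAbs : Int) + 1 - 1)).toNat = (tr - r).natAbs by omega]
    refine List.map_congr_left (fun j hj => ?_)
    rw [List.mem_range] at hj
    simp only [Function.comp]
    rw [if_pos (by omega : (1 : Int) + j ≤ ((tr - r).natAbs : Int))]
    by_cases hr : r < tr
    · rw [if_pos (by omega : tr - r > 0), if_neg (by omega : ¬ tr - r < 0), if_pos hr,
        Prod.mk.injEq]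
      exact ⟨by ring, rfl⟩
    · rw [if_neg (by omega : ¬ tr - r > 0), if_pos (by omega : tr - r < 0), if_neg hr,
        Prod.mk.injEq]
      exact ⟨by ring, rfl⟩
  · rw [PySem.List.pyRange_one, List.map_map,
      show ((((tr - r).natAbs : Int) + ((tc - c).natAbs : Int) + 1 - (((tr - r).natAbs : Int) + 1))).toNat
        = (tc - c).natAbs by omega]
    refine List.map_congr_left (fun j hj => ?_)
    rw [List.mem_range] at hj
    simp only [Function.comp]
    rw [if_neg (by omega : ¬ (((tr - r).natAbs : Int) + 1 + (j : Int) ≤ ((tr - r).natAbs : Int)))]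
    rw [show ((tr - r).natAbs : Int) + 1 + (j : Int) - ((tr - r).natAbs : Int) = 1 + j by omega]
    by_cases hc : c < tc
    · rw [if_pos (by omega : tc - c > 0), if_neg (by omega : ¬ tc - c < 0), if_pos hc,
        Prod.mk.injEq]
      exact ⟨rfl, by ring⟩
    · rw [if_neg (by omega : ¬ tc - c > 0), if_pos (by omega : tc - c < 0), if_neg hc,
        Prod.mk.injEq]
      exact ⟨rfl, by ring⟩

-- ===== VERDICT =====
theorem get_manhattan_path_spec : Claim_equal_get_manhattan_path := by
  intro s e _
  unfold Spec_get_manhattan_path get_manhattan_path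
  rw [show e = (e.1, e.2) from rfl, show s = (s.1, s.2) from rfl, pvAlt_norm]
  exact pvLoopA_norm s.1 s.2 e.1 e.2
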